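-- pv_equiv track=rewrite | github.com/dhruvjaglan/marketing-ai | django_backend/marketingai/filters_utils.py | get_min_max_avg_funding
-- ===== SOURCE A (Python) =====
-- def get_min_max_avg_funding(target_stages):
--     funding_data = {
--         "pre-seed": {"min": 100000, "max": 5000000, "average": 500000},
--         "seed": {"min": 500000, "max": 10000000, "average": 4600000},
--         "series-a": {"min": 2000000, "max": 50000000, "average": 18000000},
--         "series-b": {"min": 10000000, "max": 100000000, "average": 35000000},
--         "series-c": {"min": 20000000, "max": 200000000, "average": 50000000},
--         "series-d+": {"min": 50000000, "max": 500000000, "average": 275000000}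
--     }
--
--     min_funding = float('inf')
--     max_funding = 0
--
--     for stage in target_stages:
--         if stage in funding_data.keys():
--             stage_data = funding_data[stage]
--             # Calculate the average if not provided
--             avg_funding_temp = stage_data.get('average')
--             min_funding_temp = stage_data.get('min')
--
--             min_funding = min(min_funding, min_funding_temp)
--             max_funding = max(max_funding, avg_funding_temp)
--
--     if min_funding == float('inf') and max_funding == 0:
--         return None, None  # No valid stages found
--     else:
--         return min_funding, max_funding
-- ===== SOURCE B (Python) =====
-- def get_min_max_avg_funding(target_stages):
--     funding_data = {
--         "pre-seed": {"min": 100000, "max": 5000000, "average": 500000},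
--         "seed": {"min": 500000, "max": 10000000, "average": 4600000},
--         "series-a": {"min": 2000000, "max": 50000000, "average": 18000000},
--         "series-b": {"min": 10000000, "max": 100000000, "average": 35000000},
--         "series-c": {"min": 20000000, "max": 200000000, "average": 50000000},
--         "series-d+": {"min": 50000000, "max": 500000000, "average": 275000000}
--     }
--     # Table-driven: scan the fixed table once against the SET of requested stages,
--     # instead of looping over target_stages with running min/max accumulators.
--     wanted = set(target_stages)
--     mins, avgs = [], []
--     for stage, data in funding_data.items():
--         if stage in wanted:
--             mins.append(data["min"])
--             avgs.append(data["average"])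
--     if not mins:
--         return None, None
--     return min(mins), max(avgs)
-- ===== Notes on version B (the rewrite author's own statement) =====
-- stated objective: alternative
-- what changed: Inverts the traversal: instead of A's single pass over target_stages with running min/max accumulators and infinity/zero sentinels, B builds a set of the requested stages, scans the fixed funding table once collecting the matched min and average columns, and reduces those lists with min/max after an explicit emptiness test.
import Mathlib
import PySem

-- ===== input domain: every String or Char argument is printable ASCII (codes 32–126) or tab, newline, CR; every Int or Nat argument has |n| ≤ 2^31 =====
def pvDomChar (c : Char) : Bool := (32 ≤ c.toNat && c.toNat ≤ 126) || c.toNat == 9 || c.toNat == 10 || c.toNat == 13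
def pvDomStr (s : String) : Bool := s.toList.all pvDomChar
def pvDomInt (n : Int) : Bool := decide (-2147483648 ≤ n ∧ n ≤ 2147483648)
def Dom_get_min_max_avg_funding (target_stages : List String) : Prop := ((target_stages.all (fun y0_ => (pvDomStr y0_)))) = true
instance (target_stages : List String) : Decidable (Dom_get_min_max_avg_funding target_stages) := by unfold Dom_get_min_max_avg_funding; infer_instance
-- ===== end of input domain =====

-- B inverts the traversal: instead of A's single pass over target_stages with running
-- min/max sentinels, it converts target_stages to a set and scans the fixed funding
-- table once, collecting matched mins/averages, then reduces (objective: alternative).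

-- shared constant: the module's funding_data dict as an association list of (min, max, average)
def fundingData : List (String × (Int × Int × Int)) :=
  [("pre-seed", (100000, 5000000, 500000)),
   ("seed", (500000, 10000000, 4600000)),
   ("series-a", (2000000, 50000000, 18000000)),
   ("series-b", (10000000, 100000000, 35000000)),
   ("series-c", (20000000, 200000000, 50000000)),
   ("series-d+", (50000000, 500000000, 275000000))]

-- ===== PORT A =====
-- A's loop state: min_funding (none models float('inf')) and max_funding starting at 0
def fundStepA (acc : Option Int × Int) (stage : String) : Option Int × Int :=
  match fundingData.lookup stage with
  | some (mn, _, avg) =>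
      (some (match acc.1 with | none => mn | some m => min m mn), max acc.2 avg)
  | none => acc

def get_min_max_avg_funding (target_stages : List String) : Option Int × Option Int :=
  let st := target_stages.foldl fundStepA (none, 0)
  if st.1.isNone && st.2 == 0 then (none, none) else (st.1, some st.2)

-- ===== PORT B =====
-- B's loop body: one scan over the fixed table, appending matched mins/averages
def fundStepB (wanted : PySem.Set String) (acc : List Int × List Int)
    (p : String × (Int × Int × Int)) : List Int × List Int :=
  if wanted.contains p.1 then (acc.1 ++ [p.2.1], acc.2 ++ [p.2.2.2]) else acc

def get_min_max_avg_funding_alt (target_stages : List String) : Option Int × Option Int :=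
  let wanted := PySem.Set.ofList target_stages
  let acc := fundingData.foldl (fundStepB wanted) ([], [])
  if acc.1.isEmpty then (none, none) else (acc.1.min?, acc.2.max?)

-- ===== PRECONDITION & SPEC =====
def Spec_get_min_max_avg_funding (target_stages : List String) (out : Option Int × Option Int) : Prop := out = get_min_max_avg_funding_alt target_stages
instance (target_stages : List String) (out : Option Int × Option Int) : Decidable (Spec_get_min_max_avg_funding target_stages out) := by unfold Spec_get_min_max_avg_funding; infer_instance

-- ===== CLAIM (what is proved, stated in full; the proofs are below) =====
def Claim_equal_get_min_max_avg_funding : Prop := ∀ (target_stages : List String), Dom_get_min_max_avg_funding target_stages → Spec_get_min_max_avg_funding target_stages (get_min_max_avg_funding target_stages)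

-- ===== LEMMAS AND PROOFS =====

-- A's matched entries (in target_stages order) and B's matched entries (in table order)
def matchedA (ts : List String) : List (Int × Int × Int) :=
  ts.filterMap (fun s => fundingData.lookup s)

def matchedB (ts : List String) : List (String × (Int × Int × Int)) :=
  fundingData.filter (fun p => (PySem.Set.ofList ts).contains p.1)

-- Once a stage matched, A's fold computes the fold-min of the remaining matched mins and fold-max of their averages.
theorem fundFold_matched (ts : List String) (m x : Int) :
    ts.foldl fundStepA (some m, x) =
      (some (((matchedA ts).map (fun d => d.1)).foldl min m),
       ((matchedA ts).map (fun d => d.2.2)).foldl max x) := by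
  induction ts generalizing m x with
  | nil => simp [matchedA]
  | cons s ts ih =>
      cases h : fundingData.lookup s with
      | none => simp [matchedA, List.foldl_cons, fundStepA, h, ih]
      | some v => simp [matchedA, List.foldl_cons, fundStepA, h, ih]

theorem lookup_avg_pos (s : String) (mn mx avg : Int)
    (h : fundingData.lookup s = some (mn, mx, avg)) : 0 < avg := by
  simp only [fundingData, List.lookup] at h
  repeat' split at h
  all_goals simp_all
  all_goals omega

-- A's result, characterised through its matched-entry list
theorem A_char (ts : List String) :
    get_min_max_avg_funding ts =
      if matchedA ts = [] then (none, none)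
      else (((matchedA ts).map (fun d => d.1)).min?, ((matchedA ts).map (fun d => d.2.2)).max?) := by
  induction ts with
  | nil => rfl
  | cons s ts ih =>
      cases h : fundingData.lookup s with
      | none =>
          have hm : matchedA (s :: ts) = matchedA ts := by
            simp [matchedA, h]
          have hf : get_min_max_avg_funding (s :: ts) = get_min_max_avg_funding ts := by
            simp [get_min_max_avg_funding, List.foldl_cons, fundStepA, h]
          rw [hf, hm, ih]
      | some v =>
          obtain ⟨mn, mx, avg⟩ := v
          have hpos : 0 < avg := lookup_avg_pos s mn mx avg h
          have h0 : max 0 avg = avg := by omega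
          have hm : matchedA (s :: ts) = (mn, mx, avg) :: matchedA ts := by
            simp [matchedA, h]
          rw [hm]
          simp [get_min_max_avg_funding, List.foldl_cons, fundStepA, h,
                fundFold_matched, List.min?, List.max?, h0]

-- B's fold appends the matched mins/averages of the table, in table order
theorem fundFoldB (wanted : PySem.Set String) (L : List (String × (Int × Int × Int)))
    (m a : List Int) :
    L.foldl (fundStepB wanted) (m, a) =
      (m ++ (L.filter (fun p => wanted.contains p.1)).map (fun p => p.2.1),
       a ++ (L.filter (fun p => wanted.contains p.1)).map (fun p => p.2.2.2)) := by
  induction L generalizing m a with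
  | nil => simp
  | cons p L ih =>
      by_cases h : p.1 ∈ wanted
      · simp [List.foldl_cons, fundStepB, h, ih]
      · simp [List.foldl_cons, fundStepB, h, ih]

theorem B_char (ts : List String) :
    get_min_max_avg_funding_alt ts =
      if matchedB ts = [] then (none, none)
      else (((matchedB ts).map (fun p => p.2.1)).min?, ((matchedB ts).map (fun p => p.2.2.2)).max?) := by
  show (if ((fundingData.foldl (fundStepB (PySem.Set.ofList ts)) ([], [])).1).isEmpty = true
        then ((none : Option Int), (none : Option Int))
        else (((fundingData.foldl (fundStepB (PySem.Set.ofList ts)) ([], [])).1).min?,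
              ((fundingData.foldl (fundStepB (PySem.Set.ofList ts)) ([], [])).2).max?)) =
       (if matchedB ts = [] then (none, none)
        else (((matchedB ts).map (fun p => p.2.1)).min?, ((matchedB ts).map (fun p => p.2.2.2)).max?))
  rw [fundFoldB]
  have e1 : (fundingData.filter (fun p => (PySem.Set.ofList ts).contains p.1)) = matchedB ts := rfl
  simp only [List.nil_append, e1]
  by_cases h : matchedB ts = []
  · rw [if_pos (by rw [h]; rfl), if_pos h]
  · rw [if_neg (by simpa [List.isEmpty_iff, List.map_eq_nil_iff] using h), if_neg h]

-- lookup in the concrete table agrees with membership (keys are distinct)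
theorem lookup_mem_iff (s : String) (v : Int × Int × Int) :
    fundingData.lookup s = some v ↔ (s, v) ∈ fundingData := by
  simp only [fundingData, List.lookup]
  repeat' split
  all_goals simp_all
  all_goals exact eq_comm

-- the two matched-entry lists carry the same values
theorem matched_mem_iff (ts : List String) (v : Int × Int × Int) :
    v ∈ matchedA ts ↔ v ∈ (matchedB ts).map (fun p => p.2) := by
  constructor
  · intro hv
    obtain ⟨s, hs, hl⟩ := List.mem_filterMap.1 hv
    refine List.mem_map.2 ⟨(s, v), ?_, rfl⟩
    refine List.mem_filter.2 ⟨(lookup_mem_iff s v).1 hl, ?_⟩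
    simpa [List.contains_iff_mem, PySem.Set.mem_ofList] using hs
  · intro hv
    obtain ⟨p, hp, rfl⟩ := List.mem_map.1 hv
    obtain ⟨hmem, hcont⟩ := List.mem_filter.1 hp
    refine List.mem_filterMap.2 ⟨p.1, ?_, ?_⟩
    · simpa [List.contains_iff_mem, PySem.Set.mem_ofList] using hcont
    · exact (lookup_mem_iff p.1 p.2).2 (by simpa using hmem)

theorem min?_congr (l1 l2 : List Int) (h : ∀ x : Int, x ∈ l1 ↔ x ∈ l2) :
    l1.min? = l2.min? := by
  cases h1 : l1.min? with
  | none =>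
      rw [List.min?_eq_none_iff] at h1
      have h2 : l2 = [] := by
        rw [List.eq_nil_iff_forall_not_mem]
        intro x hx
        exact absurd ((h x).mpr hx) (by simp [h1])
      simp [h2]
  | some a =>
      obtain ⟨ha, hall⟩ := List.min?_eq_some_iff_subtype.1 h1
      exact (List.min?_eq_some_iff_subtype.2 ⟨(h a).1 ha, fun b hb => hall b ((h b).2 hb)⟩).symm

theorem max?_congr (l1 l2 : List Int) (h : ∀ x : Int, x ∈ l1 ↔ x ∈ l2) :
    l1.max? = l2.max? := by
  cases h1 : l1.max? with
  | none =>
      rw [List.max?_eq_none_iff] at h1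
      have h2 : l2 = [] := by
        rw [List.eq_nil_iff_forall_not_mem]
        intro x hx
        exact absurd ((h x).mpr hx) (by simp [h1])
      simp [h2]
  | some a =>
      obtain ⟨ha, hall⟩ := List.max?_eq_some_iff.1 h1
      exact (List.max?_eq_some_iff.2 ⟨(h a).1 ha, fun b hb => hall b ((h b).2 hb)⟩).symm

-- membership equivalence lifted through a projection
theorem map_mem_iff (ts : List String) (f : (Int × Int × Int) → Int) (x : Int) :
    x ∈ (matchedA ts).map f ↔ x ∈ (matchedB ts).map (fun p => f p.2) := by
  constructor
  · intro hx
    obtain ⟨d, hd, rfl⟩ := List.mem_map.1 hx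
    obtain ⟨p, hp, rfl⟩ := List.mem_map.1 ((matched_mem_iff ts d).1 hd)
    exact List.mem_map.2 ⟨p, hp, rfl⟩
  · intro hx
    obtain ⟨p, hp, rfl⟩ := List.mem_map.1 hx
    have : p.2 ∈ matchedA ts := (matched_mem_iff ts p.2).2 (List.mem_map.2 ⟨p, hp, rfl⟩)
    exact List.mem_map.2 ⟨p.2, this, rfl⟩

theorem main_equiv (ts : List String) :
    get_min_max_avg_funding ts = get_min_max_avg_funding_alt ts := by
  rw [A_char, B_char]
  have hempty : matchedA ts = [] ↔ matchedB ts = [] := by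
    constructor <;> intro h
    · rw [List.eq_nil_iff_forall_not_mem]
      intro p hp
      exact absurd ((matched_mem_iff ts p.2).mpr (List.mem_map.2 ⟨p, hp, rfl⟩)) (by simp [h])
    · rw [List.eq_nil_iff_forall_not_mem]
      intro v hv
      have := (matched_mem_iff ts v).mp hv
      simp [h] at this
  by_cases h : matchedA ts = []
  · simp [h, hempty.1 h]
  · have h2 : ¬ matchedB ts = [] := fun hh => h (hempty.2 hh)
    simp only [h, h2, if_false]
    rw [Prod.mk.injEq]
    exact ⟨min?_congr _ _ (map_mem_iff ts (fun d => d.1)),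
           max?_congr _ _ (map_mem_iff ts (fun d => d.2.2))⟩

-- ===== VERDICT (by name: the statement is the Claim_ definition above) =====
theorem get_min_max_avg_funding_spec : Claim_equal_get_min_max_avg_funding := by
  intro ts _
  unfold Spec_get_min_max_avg_funding
  exact main_equiv ts
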